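-- pv_equiv track=rewrite | github.com/imageslr/NLP | 0.Data/data_process/dailydialog_process.py | punctuation_processing_standby_application
-- ===== SOURCE A (Python) =====
-- def punctuation_processing_standby_application(line):
--     """
--     1\在',', '.', '?', '!'符号前加入空格
--     2\去除'[',']','...','-','<i>','</i>','<u>','</u>'
--     :param line: 原始句子
--     :return: line_pro 处理后的句子
--     """
--     punctuationlist = [',', '.', '?', '!']
--     pset = set(punctuationlist)
--     line_pro = ''
--     for i in range(len(line)):
--         if line[i] == '"':
--             line_pro += (' ' + line[i] + ' ')
--         elif (line[i] in pset) and i>0 and line[i-1]!='.':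
--             line_pro += (' ' + line[i])
--         else:
--             line_pro += line[i]
--     return line_pro
-- ===== SOURCE B (Python) =====
-- def punctuation_processing_standby_application(line):
--     # Different algorithm: split the line on '.', so the "previous char is a dot"
--     # condition becomes structural. Inside a dot-free segment every , ? ! except one
--     # at segment position 0 gets a space (str.replace on the tail does all of them);
--     # a separating '.' gets a space iff the segment before it is nonempty. Quotes are
--     # wrapped by one final replace.
--     def seg(s):
--         return s[:1] + s[1:].replace(',', ' ,').replace('?', ' ?').replace('!', ' !')
--     parts = line.split('.')
--     out = seg(parts[0])
--     for prev, p in zip(parts, parts[1:]):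
--         out += (' .' if prev else '.') + seg(p)
--     return out.replace('"', ' " ')
-- ===== Notes on version B (the rewrite author's own statement) =====
-- stated objective: faster
-- what changed: Replaces A's per-character index loop with prev-char tests by splitting the line on the dot character and processing it with whole-string str.replace passes: each dot-free segment gets its tail punctuation spaced by three replaces, a separating dot gets a space iff the preceding segment is nonempty, and quotes are wrapped by one final replace.
import Mathlib
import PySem

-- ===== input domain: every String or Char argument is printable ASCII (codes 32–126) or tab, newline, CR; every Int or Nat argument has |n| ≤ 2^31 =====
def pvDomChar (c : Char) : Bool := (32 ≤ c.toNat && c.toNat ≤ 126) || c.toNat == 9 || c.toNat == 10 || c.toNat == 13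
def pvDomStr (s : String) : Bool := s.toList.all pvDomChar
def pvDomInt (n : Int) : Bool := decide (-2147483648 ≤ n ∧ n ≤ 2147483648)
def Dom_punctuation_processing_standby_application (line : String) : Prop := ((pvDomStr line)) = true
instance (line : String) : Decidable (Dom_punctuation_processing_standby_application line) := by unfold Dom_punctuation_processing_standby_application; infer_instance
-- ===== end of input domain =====

-- B replaces A's per-character index loop (with its prev-char tests) by a split on '.'
-- plus whole-string replace passes; objective: alternative, same return value everywhere.

-- ===== PORT A =====
def punctuation_processing_standby_application (line : String) : String :=
  let cs := line.toList
  let pset := PySem.Set.ofList [',', '.', '?', '!']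
  let out := (PySem.List.pyRange 0 (cs.length : Int) 1).foldl (fun line_pro i =>
    let c := PySem.List.pyGetD cs i ' '
    if c = '"' then line_pro ++ ([' '] ++ [c] ++ [' '])
    else if PySem.Set.contains pset c ∧ 0 < i ∧ PySem.List.pyGetD cs (i - 1) ' ' ≠ '.' then
      line_pro ++ ([' '] ++ [c])
    else line_pro ++ [c]) []
  String.ofList out

-- ===== PORT B =====
-- Source B's helper seg: s[:1] + s[1:].replace(',',' ,').replace('?',' ?').replace('!',' !')
def pvSegB (s : List Char) : List Char :=
  s.take 1 ++ PySem.Chars.replace (PySem.Chars.replace (PySem.Chars.replace (s.drop 1)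
      [','] [' ', ',']) ['?'] [' ', '?']) ['!'] [' ', '!']

def punctuation_processing_standby_application_alt (line : String) : String :=
  let parts := PySem.Chars.splitOn line.toList ['.']
  let out := (parts.zip parts.tail).foldl (fun out pp =>
      out ++ (if pp.1 ≠ [] then [' ', '.'] else ['.']) ++ pvSegB pp.2) (pvSegB (parts.headD []))
  String.ofList (PySem.Chars.replace out ['"'] [' ', '"', ' '])

-- ===== PRECONDITION & SPEC =====
def Spec_punctuation_processing_standby_application (line : String) (out : String) : Prop := out = punctuation_processing_standby_application_alt line
instance (line : String) (out : String) : Decidable (Spec_punctuation_processing_standby_application line out) := by unfold Spec_punctuation_processing_standby_application; infer_instance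

-- ===== CLAIM =====
def Claim_equal_punctuation_processing_standby_application : Prop := ∀ (line : String), Dom_punctuation_processing_standby_application line → Spec_punctuation_processing_standby_application line (punctuation_processing_standby_application line)

-- ===== LEMMAS AND PROOFS =====

/-- The common per-character spec of the punctuation pass: the flag is "previous char
is a dot, or there is no previous char" (then no space is inserted). -/
def pvP : Bool → List Char → List Char
  | _, [] => []
  | b, c :: r =>
    (if (c = ',' ∨ c = '.' ∨ c = '?' ∨ c = '!') ∧ b = false then [' ', c] else [c]) ++
      pvP (decide (c = '.')) r

/-- A's interleaved per-character spec (quote wrapping fused in). -/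
def pvA : Bool → List Char → List Char
  | _, [] => []
  | b, c :: r =>
    (if c = '"' then [' ', '"', ' ']
     else if (c = ',' ∨ c = '.' ∨ c = '?' ∨ c = '!') ∧ b = false then [' ', c]
     else [c]) ++ pvA (decide (c = '.')) r

/-- The quote-wrapping pass, per character. -/
def pvQ (c : Char) : List Char := if c = '"' then [' ', '"', ' '] else [c]

/-- The three tail replaces of `seg`, fused per character. -/
def pvF (c : Char) : List Char :=
  if c = ',' then [' ', ','] else if c = '?' then [' ', '?'] else
  if c = '!' then [' ', '!'] else [c]

/-- Spec form of `seg`. -/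
def pvSegS (s : List Char) : List Char := s.take 1 ++ (s.drop 1).flatMap pvF

/-- Recursive characterisation of splitting on '.'. -/
def pvSplitC : List Char → List (List Char)
  | [] => [[]]
  | c :: r => match pvSplitC r with
    | [] => []
    | h :: t => if c = '.' then [] :: h :: t else (c :: h) :: t

/-- Spec of B's joining fold over the tail parts; the flag says "previous part nonempty". -/
def pvJz : Bool → List (List Char) → List Char
  | _, [] => []
  | ne, p :: ps => (if ne then [' ', '.'] else ['.']) ++ pvSegS p ++ pvJz (decide (p ≠ [])) ps

/-- A's per-index loop piece. -/
def pvPieceA (cs : List Char) (i : Int) : List Char :=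
  let c := PySem.List.pyGetD cs i ' '
  if c = '"' then [' '] ++ [c] ++ [' ']
  else if PySem.Set.contains (PySem.Set.ofList [',', '.', '?', '!']) c ∧ 0 < i ∧
      PySem.List.pyGetD cs (i - 1) ' ' ≠ '.' then [' '] ++ [c]
  else [c]

/-- `pvCH pre` prepends `pre` to the first part. -/
def pvCH (pre : List Char) : List (List Char) → List (List Char)
  | [] => [pre]
  | h :: t => (pre ++ h) :: t

lemma pvReplaceGo_single (o : Char) (new : List Char) :
    ∀ (l : List Char) (fuel : Nat) (acc : List Char), l.length ≤ fuel →
      PySem.Chars.replace.go [o] new fuel l acc =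
        acc.reverse ++ l.flatMap (fun c => if c = o then new else [c]) := by
  intro l
  induction l with
  | nil => intro fuel acc h; cases fuel <;> simp [PySem.Chars.replace.go]
  | cons c t ih =>
    intro fuel acc h
    simp only [List.length_cons] at h
    cases fuel with
    | zero => omega
    | succ n =>
      rw [PySem.Chars.replace.go]
      by_cases hc : c = o
      · subst hc
        have hp : [c].isPrefixOf (c :: t) = true := by simp [List.isPrefixOf]
        rw [if_pos hp]
        simp only [List.length_singleton, List.drop_succ_cons, List.drop_zero]
        rw [ih n _ (by omega)]
        simp
      · have hp : [o].isPrefixOf (c :: t) = false := by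
          simp [List.isPrefixOf]; exact fun hh => (hc hh.symm).elim
        rw [if_neg (by simp [hp])]
        rw [ih n _ (by omega)]
        simp [hc]

lemma pvReplace_single (l : List Char) (o : Char) (new : List Char) :
    PySem.Chars.replace l [o] new = l.flatMap (fun c => if c = o then new else [c]) := by
  simp [PySem.Chars.replace, pvReplaceGo_single o new l l.length [] le_rfl]

lemma pvSplitC_ne_nil : ∀ l : List Char, pvSplitC l ≠ [] := by
  intro l
  induction l with
  | nil => simp [pvSplitC]
  | cons c r ih =>
    rw [pvSplitC]
    rcases hs : pvSplitC r with _ | ⟨h, t⟩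
    · exact (ih hs).elim
    · by_cases hc : c = '.' <;> simp [hc]

lemma pvSplitGo : ∀ (l : List Char) (fuel : Nat) (cur : List Char) (acc : List (List Char)),
    l.length < fuel →
    PySem.Chars.splitOn.go ['.'] fuel l cur acc =
      acc.reverse ++ pvCH cur.reverse (pvSplitC l) := by
  intro l
  induction l with
  | nil =>
    intro fuel cur acc h
    cases fuel with
    | zero => omega
    | succ n =>
      rw [PySem.Chars.splitOn.go.eq_def]
      simp [pvSplitC, pvCH]
  | cons c t ih =>
    intro fuel cur acc h
    simp only [List.length_cons] at h
    cases fuel with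
    | zero => omega
    | succ n =>
      rw [PySem.Chars.splitOn.go.eq_def]
      rcases hs : pvSplitC t with _ | ⟨h1, t1⟩
      · exact (pvSplitC_ne_nil t hs).elim
      by_cases hc : c = '.'
      · subst hc
        have hp : ['.'].isPrefixOf ('.' :: t) = true := by simp [List.isPrefixOf]
        simp only [hp, if_true]
        rw [List.length_singleton, List.drop_succ_cons, List.drop_zero, ih n _ _ (by omega)]
        simp [pvSplitC, hs, pvCH]
      · have hp : ['.'].isPrefixOf (c :: t) = false := by
          simp [List.isPrefixOf]; exact fun hh => (hc hh.symm).elim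
        simp only [hp, Bool.false_eq_true, if_false]
        rw [ih n _ _ (by omega)]
        simp [pvSplitC, hs, pvCH, hc]

lemma pvSplit_eq (l : List Char) : PySem.Chars.splitOn l ['.'] = pvSplitC l := by
  rw [PySem.Chars.splitOn, pvSplitGo l (l.length + 1) [] [] (by omega)]
  rcases hs : pvSplitC l with _ | ⟨h, t⟩
  · exact (pvSplitC_ne_nil l hs).elim
  · simp [pvCH]

lemma pvSeg_eq (s : List Char) : pvSegB s = pvSegS s := by
  unfold pvSegB pvSegS
  rw [pvReplace_single, pvReplace_single, pvReplace_single, List.flatMap_assoc,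
    List.flatMap_assoc]
  congr 1
  apply List.flatMap_congr
  intro c _
  by_cases h1 : c = ',' <;> by_cases h2 : c = '?' <;> by_cases h3 : c = '!' <;>
    simp_all [pvF]

lemma pvFoldZip : ∀ (t : List (List Char)) (h : List Char) (acc : List Char),
    (((h :: t).zip t).foldl (fun out pp =>
      out ++ (if pp.1 ≠ [] then [' ', '.'] else ['.']) ++ pvSegB pp.2) acc) =
      acc ++ pvJz (decide (h ≠ [])) t := by
  intro t
  induction t with
  | nil => intro h acc; simp [pvJz]
  | cons p ps ih =>
    intro h acc
    simp only [List.zip_cons_cons, List.foldl_cons]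
    rw [ih p _, pvSeg_eq, pvJz]
    by_cases hh : h = [] <;> simp [hh]

lemma pvMain : ∀ (cs : List Char) (b : Bool),
    (match pvSplitC cs with
     | [] => []
     | h :: t => (if b then pvSegS h else h.flatMap pvF) ++ pvJz (!b || decide (h ≠ [])) t) =
      pvP b cs := by
  intro cs
  induction cs with
  | nil => intro b; cases b <;> simp [pvSplitC, pvJz, pvP, pvSegS]
  | cons c r ih =>
    intro b
    rcases hs : pvSplitC r with _ | ⟨h, t⟩
    · exact (pvSplitC_ne_nil r hs).elim
    by_cases hc : c = '.'
    · subst hc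
      have ihr := ih true
      rw [hs] at ihr
      simp only [pvSplitC, hs]
      cases b with
      | true =>
        simp [pvJz, pvP, pvSegS] at ihr ⊢
        exact ihr
      | false =>
        simp [pvJz, pvP, pvSegS] at ihr ⊢
        exact ihr
    · have ihr := ih false
      rw [hs] at ihr
      simp only [pvSplitC, hs]
      cases b with
      | true =>
        simp [pvP, pvSegS, hc] at ihr ⊢
        simp [ihr]
      | false =>
        have hfc : pvF c = (if (c = ',' ∨ c = '.' ∨ c = '?' ∨ c = '!') ∧
            (false : Bool) = false then [' ', c] else [c]) := by
          by_cases h1 : c = ',' <;> by_cases h2 : c = '?' <;> by_cases h3 : c = '!' <;>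
            simp_all [pvF]
        simp [pvP, hc, hfc] at ihr ⊢
        simp [ihr]

lemma pvA_flatMap : ∀ (cs : List Char) (b : Bool), pvA b cs = (pvP b cs).flatMap pvQ := by
  intro cs
  induction cs with
  | nil => intro b; simp [pvA, pvP]
  | cons c r ih =>
    intro b
    rw [pvA, pvP, List.flatMap_append, ← ih]
    congr 1
    by_cases hq : c = '"'
    · subst hq; simp [pvQ]
    · by_cases hp : (c = ',' ∨ c = '.' ∨ c = '?' ∨ c = '!') ∧ b = false <;>
        simp [hq, hp, pvQ]

lemma pvPieceA_at (pre suf : List Char) (c : Char) :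
    pvPieceA (pre ++ c :: suf) (pre.length : Int) =
      (if c = '"' then [' ', '"', ' ']
       else if (c = ',' ∨ c = '.' ∨ c = '?' ∨ c = '!') ∧
           (decide (pre = []) || decide (pre.getLast? = some '.')) = false then [' ', c]
       else [c]) := by
  have hget : PySem.List.pyGetD (pre ++ c :: suf) (pre.length : Int) ' ' = c := by
    rw [PySem.List.pyGetD_natCast]
    simp [List.getD]
  unfold pvPieceA
  simp only [hget]
  by_cases hq : c = '"'
  · simp [hq]
  · rw [if_neg hq, if_neg hq]
    have hcond : (PySem.Set.contains (PySem.Set.ofList [',', '.', '?', '!']) c = true ∧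
        0 < (pre.length : Int) ∧
          PySem.List.pyGetD (pre ++ c :: suf) ((pre.length : Int) - 1) ' ' ≠ '.') ↔
        ((c = ',' ∨ c = '.' ∨ c = '?' ∨ c = '!') ∧
          (decide (pre = []) || decide (pre.getLast? = some '.')) = false) := by
      have hmem : PySem.Set.contains (PySem.Set.ofList [',', '.', '?', '!']) c = true ↔
          (c = ',' ∨ c = '.' ∨ c = '?' ∨ c = '!') := by
        rw [PySem.Set.contains_iff, PySem.Set.mem_ofList]
        simp
      by_cases hpre : pre = []
      · subst hpre; simp
      · have hlen : 1 ≤ pre.length := by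
          cases pre with | nil => exact (hpre rfl).elim | cons _ _ => simp
        have hcast : ((pre.length : Int) - 1) = ((pre.length - 1 : Nat) : Int) := by omega
        have hprev : PySem.List.pyGetD (pre ++ c :: suf) ((pre.length : Int) - 1) ' ' =
            pre.getLast hpre := by
          rw [hcast, PySem.List.pyGetD_natCast]
          rw [List.getD_eq_getElem?_getD, List.getElem?_append_left (by omega)]
          rw [List.getLast_eq_getElem]
          simp [List.getElem?_eq_getElem (by omega : pre.length - 1 < pre.length)]
        rw [hprev]
        have hlast : pre.getLast? = some (pre.getLast hpre) :=
          List.getLast?_eq_some_getLast hpre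
        constructor
        · rintro ⟨h1, _, h3⟩
          refine ⟨hmem.mp h1, ?_⟩
          simp [hpre, hlast]
          intro hcontra; exact h3 hcontra
        · rintro ⟨h1, h2⟩
          refine ⟨hmem.mpr h1, by omega, ?_⟩
          simp [hpre, hlast] at h2
          exact h2
    simp only [hcond]
    split_ifs <;> rfl

lemma pvA_range : ∀ (suf pre : List Char),
    (PySem.List.pyRange (pre.length : Int) ((pre.length : Int) + suf.length) 1).flatMap
        (pvPieceA (pre ++ suf)) =
      pvA (decide (pre = []) || decide (pre.getLast? = some '.')) suf := by
  intro suf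
  induction suf with
  | nil => intro pre; simp [pysem, pvA]
  | cons c rest ih =>
    intro pre
    rw [PySem.List.pyRange_one_cons (by simp)]
    rw [List.flatMap_cons, pvPieceA_at]
    have hre : pre ++ c :: rest = (pre ++ [c]) ++ rest := by simp
    have hlen : (pre.length : Int) + 1 = ((pre ++ [c]).length : Int) := by simp
    have hbound : (pre.length : Int) + (c :: rest).length =
        ((pre ++ [c]).length : Int) + rest.length := by simp; omega
    rw [hre, hbound, hlen, ih (pre ++ [c])]
    rw [pvA]
    simp

lemma pvA_eq (line : String) :
    punctuation_processing_standby_application line =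
      String.ofList ((pvP true line.toList).flatMap pvQ) := by
  have h1 : (fun (line_pro : List Char) (i : Int) =>
      let c := PySem.List.pyGetD line.toList i ' '
      if c = '"' then line_pro ++ ([' '] ++ [c] ++ [' '])
      else if PySem.Set.contains (PySem.Set.ofList [',', '.', '?', '!']) c ∧ 0 < i ∧
          PySem.List.pyGetD line.toList (i - 1) ' ' ≠ '.' then line_pro ++ ([' '] ++ [c])
      else line_pro ++ [c]) = (fun acc i => acc ++ pvPieceA line.toList i) := by
    funext acc i
    simp only [pvPieceA]
    split_ifs <;> rfl
  have h2 := pvA_range line.toList []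
  simp only [List.length_nil, Nat.cast_zero, zero_add, List.nil_append, decide_true,
    Bool.true_or] at h2
  unfold punctuation_processing_standby_application
  dsimp only
  rw [h1, PySem.List.foldl_append_eq_flatMap, List.nil_append, h2, pvA_flatMap]

lemma pvB_eq (line : String) :
    punctuation_processing_standby_application_alt line =
      String.ofList ((pvP true line.toList).flatMap pvQ) := by
  unfold punctuation_processing_standby_application_alt
  dsimp only
  rw [pvSplit_eq]
  rcases hs : pvSplitC line.toList with _ | ⟨h, t⟩
  · exact (pvSplitC_ne_nil _ hs).elim
  have hmain := pvMain line.toList true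
  rw [hs] at hmain
  simp only [if_true, Bool.not_true, Bool.false_or] at hmain
  simp only [List.headD_cons, List.tail_cons]
  rw [pvFoldZip t h (pvSegB h), pvSeg_eq, pvReplace_single]
  rw [show (fun c => if c = '"' then [' ', '"', ' '] else [c]) = pvQ from rfl]
  rw [hmain]

-- ===== VERDICT =====
theorem punctuation_processing_standby_application_spec : Claim_equal_punctuation_processing_standby_application := by
  intro line _
  unfold Spec_punctuation_processing_standby_application
  rw [pvA_eq, pvB_eq]
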